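-- pv_equiv track=rewrite | github.com/zoek1/exeggecutor-katas | tests/fizzbuzz_test.py | no_multiples
-- ===== SOURCE A (Python) =====
-- def no_multiples(base, limit=100):
--     """the most simple generator of non multiples"""
--     no_multiples = []
--
--     if base in [1, -1] or limit < 1:
--         return []
--
--     if base == 0:
--         return list(range(1, limit))
--
--     while len(no_multiples) < limit:
--         no_multiples = [(base * len(no_multiples)) - 1] + no_multiples
--
--     return no_multiples
-- ===== SOURCE B (Python) =====
-- def no_multiples(base, limit=100):
--     """Closed-form: the result is the arithmetic progression base*i - 1 for
--     i = limit-1 .. 0, i.e. constant step base; build it with range and reverse."""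
--     if base in (1, -1) or limit < 1:
--         return []
--     if base == 0:
--         return list(range(1, limit))
--     return list(range(-1, base * limit - 1, base))[::-1]
-- ===== Notes on version B (the rewrite author's own statement) =====
-- stated objective: simpler
-- what changed: Replaced A's while loop that repeatedly prepends (base*len-1) to a growing list by a direct closed-form construction: the result is the arithmetic progression with first term -1 and step base, built once with range(-1, base*limit-1, base) and reversed.
import Mathlib
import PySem

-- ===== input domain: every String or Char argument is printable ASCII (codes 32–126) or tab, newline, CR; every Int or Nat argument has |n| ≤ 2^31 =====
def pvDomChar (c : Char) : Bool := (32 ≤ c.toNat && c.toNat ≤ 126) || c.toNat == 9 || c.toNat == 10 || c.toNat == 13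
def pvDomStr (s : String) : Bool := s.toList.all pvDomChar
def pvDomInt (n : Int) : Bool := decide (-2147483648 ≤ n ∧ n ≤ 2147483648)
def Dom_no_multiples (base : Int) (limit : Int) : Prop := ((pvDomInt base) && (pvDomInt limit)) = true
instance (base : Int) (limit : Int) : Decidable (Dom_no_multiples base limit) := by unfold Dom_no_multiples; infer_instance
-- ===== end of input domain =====

-- B replaces A's quadratic prepend loop by the closed-form arithmetic progression
-- range(-1, base*limit-1, base) reversed; same return value, proved equal below.

-- ===== PORT A =====
-- the while loop: prepend (base * len(acc)) - 1 while len(acc) < limit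
def noMultLoop (base : Int) (limit : Int) (acc : List Int) : List Int :=
  if (acc.length : Int) < limit then
    noMultLoop base limit ((base * (acc.length : Int) - 1) :: acc)
  else acc
termination_by (limit - acc.length).toNat
decreasing_by simp only [List.length_cons]; omega

def no_multiples (base : Int) (limit : Int) : List Int :=
  if base = 1 ∨ base = -1 ∨ limit < 1 then []
  else if base = 0 then PySem.List.pyRange 1 limit 1
  else noMultLoop base limit []

-- ===== PORT B =====
def no_multiples_alt (base : Int) (limit : Int) : List Int :=
  if base = 1 ∨ base = -1 ∨ limit < 1 then []
  else if base = 0 then PySem.List.pyRange 1 limit 1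
  else (PySem.List.pyRange (-1) (base * limit - 1) base).reverse  -- xs[::-1] = reverse (PySem.List.slice?_none_none_neg_one)

-- ===== PRECONDITION & SPEC =====
def Spec_no_multiples (base : Int) (limit : Int) (out : List Int) : Prop := out = no_multiples_alt base limit
instance (base : Int) (limit : Int) (out : List Int) : Decidable (Spec_no_multiples base limit out) := by unfold Spec_no_multiples; infer_instance

-- ===== CLAIM (what is proved, stated in full; the proofs are below) =====
def Claim_equal_no_multiples : Prop := ∀ (base : Int) (limit : Int), Dom_no_multiples base limit → Spec_no_multiples base limit (no_multiples base limit)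

-- ===== LEMMAS AND PROOFS =====

-- Loop invariant: with fuel = (limit - |acc|).toNat, the loop prepends exactly the
-- values base*(limit-1-j)-1 for j = fuel-1 .. 0 (j counted from the outside in).
theorem noMultLoop_eq (base limit : Int) :
    ∀ (fuel : Nat) (acc : List Int), (limit - acc.length).toNat = fuel →
      noMultLoop base limit acc
        = (List.range fuel).map (fun j : Nat => base * (limit - 1 - (j : Int)) - 1) ++ acc := by
  intro fuel
  induction fuel with
  | zero =>
      intro acc h
      rw [noMultLoop]
      simp only [List.range_zero, List.map_nil, List.nil_append]
      rw [if_neg (by omega)]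
  | succ n ih =>
      intro acc h
      rw [noMultLoop, if_pos (by omega)]
      rw [ih ((base * (acc.length : Int) - 1) :: acc) (by simp only [List.length_cons]; omega)]
      rw [List.range_succ, List.map_append]
      simp only [List.map_cons, List.map_nil, List.append_assoc, List.cons_append, List.nil_append]
      have : base * ((limit : Int) - 1 - (n : Int)) - 1 = base * (acc.length : Int) - 1 := by
        have : (acc.length : Int) = limit - 1 - n := by omega
        rw [this]
      rw [this]

-- Reversing a mapped range re-indexes j ↦ n-1-j.
theorem reverse_map_range (f : Nat → Int) :
    ∀ n : Nat, ((List.range n).map f).reverse = (List.range n).map (fun j => f (n - 1 - j)) := by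
  intro n
  apply List.ext_getElem
  · simp
  · intro i h1 h2
    simp only [List.length_reverse, List.length_map, List.length_range] at h1 h2
    simp only [List.getElem_reverse, List.getElem_map, List.getElem_range,
      List.length_map, List.length_range]

-- For |base| ≥ 2 and limit ≥ 1, range(-1, base*limit-1, base) has exactly limit
-- terms -1 + base*k.
theorem pyRange_closed (base limit : Int) (hb : base < -1 ∨ 1 < base) (hl : 1 ≤ limit) :
    PySem.List.pyRange (-1) (base * limit - 1) base
      = (List.range limit.toNat).map (fun k : Nat => -1 + base * (k : Int)) := by
  have key : ∀ m l : Int, 2 ≤ m → (m - 1 + l * m) / m = l := by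
    intro m l hm
    rw [Int.add_mul_ediv_right _ _ (by omega : m ≠ 0),
      Int.ediv_eq_zero_of_lt (by omega) (by omega)]
    omega
  rcases hb with hb | hb
  · rw [PySem.List.pyRange_of_neg _ _ (by omega)]
    have hlt : base * limit - 1 < -1 := by nlinarith
    rw [if_pos hlt]
    have hnum : -1 - (base * limit - 1) + -base - 1 = (-base) - 1 + limit * (-base) := by ring
    rw [hnum, key (-base) limit (by omega)]
  · rw [PySem.List.pyRange_of_pos _ _ (by omega)]
    have hlt : (-1 : Int) < base * limit - 1 := by nlinarith
    rw [if_pos hlt]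
    have hnum : base * limit - 1 - -1 + base - 1 = base - 1 + limit * base := by ring
    rw [hnum, key base limit (by omega)]

-- ===== VERDICT (by name: the statement is the Claim_ definition above) =====
theorem no_multiples_spec : Claim_equal_no_multiples := by
  intro base limit _
  unfold Spec_no_multiples no_multiples no_multiples_alt
  split
  · rfl
  · split
    · rfl
    · rename_i hg hz
      push_neg at hg
      obtain ⟨h1, hm1, hl⟩ := hg
      rw [noMultLoop_eq base limit limit.toNat [] (by simp)]
      rw [pyRange_closed base limit (by omega) (by omega)]
      rw [reverse_map_range]
      simp only [List.append_nil]
      apply List.map_congr_left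
      intro j hj
      rw [List.mem_range] at hj
      have hcast : ((limit.toNat - 1 - j : Nat) : Int) = limit - 1 - (j : Int) := by omega
      rw [hcast]
      ring
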